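-- pv_equiv track=rewrite | github.com/demon-5656/Tasks | Task1/Task1.py | mass_cr
-- ===== SOURCE A (Python) =====
-- def mass_cr(n):
--     i=0
--     j=1
--     mass_les = n-1; mass_les*=n;
--     mass=[]
--     while len(mass)<=mass_les:
--         if j<n:
--             mass.append(j)
--             j+=1
--         elif j==n:
--             mass.append(j)
--             j=1
--         else:
--             break
--     return mass
-- ===== SOURCE B (Python) =====
-- def mass_cr(n):
--     if n <= 0:
--         return []
--     block = list(range(1, n + 1))
--     return block * (n - 1) + [1]
-- ===== Notes on version B (the rewrite author's own statement) =====
-- stated objective: simpler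
-- what changed: Instead of emitting elements one by one with a stateful counter that increments and resets, B builds the base cycle [1..n] once as a whole block, replicates that block n-1 times by list repetition, and appends the single closing element [1].
import Mathlib
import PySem

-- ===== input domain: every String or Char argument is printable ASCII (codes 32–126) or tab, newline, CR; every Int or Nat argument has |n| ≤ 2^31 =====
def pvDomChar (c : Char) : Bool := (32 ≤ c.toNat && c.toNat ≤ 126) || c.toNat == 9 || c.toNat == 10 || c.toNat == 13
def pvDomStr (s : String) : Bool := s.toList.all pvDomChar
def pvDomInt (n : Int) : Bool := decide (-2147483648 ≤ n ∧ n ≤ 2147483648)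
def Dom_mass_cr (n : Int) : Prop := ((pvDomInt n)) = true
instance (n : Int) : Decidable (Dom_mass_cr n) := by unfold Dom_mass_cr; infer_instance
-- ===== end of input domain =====

-- B builds the base block [1..n] once and repeats it n-1 times, then appends [1],
-- instead of A's element-by-element stateful counter loop (objective: simpler).

-- ===== PORT A =====
-- the while loop of A: state is (j, mass); loop while len(mass) <= mass_les, break when j out of 1..n
def massLoopA (n massLes j : Int) (mass : List Int) : List Int :=
  if (mass.length : Int) ≤ massLes then
    if j < n then massLoopA n massLes (j + 1) (mass ++ [j])
    else if j = n then massLoopA n massLes 1 (mass ++ [j])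
    else mass
  else mass
termination_by (massLes + 1 - (mass.length : Int)).toNat
decreasing_by
  · simp only [List.length_append, List.length_cons, List.length_nil]
    omega
  · simp only [List.length_append, List.length_cons, List.length_nil]
    omega

def mass_cr (n : Int) : List Int :=
  massLoopA n ((n - 1) * n) 1 []

-- ===== PORT B =====
def mass_cr_alt (n : Int) : List Int :=
  if n ≤ 0 then []
  else (List.replicate (n - 1).toNat (PySem.List.pyRange 1 (n + 1) 1)).flatten ++ [1]

-- ===== PRECONDITION & SPEC =====
def Spec_mass_cr (n : Int) (out : List Int) : Prop := out = mass_cr_alt n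
instance (n : Int) (out : List Int) : Decidable (Spec_mass_cr n out) := by unfold Spec_mass_cr; infer_instance

-- ===== CLAIM (what is proved, stated in full; the proofs are below) =====
def Claim_equal_mass_cr : Prop := ∀ (n : Int), Dom_mass_cr n → Spec_mass_cr n (mass_cr n)

-- ===== LEMMAS AND PROOFS =====

/-- The cycle 1..n starting at `j`, of length `k` (proof-side characterisation of A's loop body). -/
def cyc (n : Int) : Int → Nat → List Int
  | _, 0 => []
  | j, k + 1 => j :: cyc n (if j < n then j + 1 else 1) k

theorem massLoopA_eq_cyc (n massLes : Int) (hn : 1 ≤ n) :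
    ∀ (k : Nat) (j : Int) (mass : List Int), 1 ≤ j → j ≤ n →
      (massLes + 1 - (mass.length : Int)).toNat = k →
      massLoopA n massLes j mass = mass ++ cyc n j k := by
  intro k
  induction k with
  | zero =>
    intro j mass _ _ hk
    unfold massLoopA
    rw [if_neg (by omega)]
    simp [cyc]
  | succ k ih =>
    intro j mass hj1 hjn hk
    unfold massLoopA
    rw [if_pos (by omega)]
    by_cases hlt : j < n
    · rw [if_pos hlt, ih (j + 1) (mass ++ [j]) (by omega) (by omega)
        (by simp only [List.length_append, List.length_cons, List.length_nil]; omega)]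
      simp [cyc, hlt]
    · have hje : j = n := le_antisymm hjn (by omega)
      rw [if_neg hlt, if_pos hje, ih 1 (mass ++ [j]) (by omega) hn
        (by simp only [List.length_append, List.length_cons, List.length_nil]; omega)]
      simp [cyc, hlt]

/-- One full pass of the cycle starting at `j` is the range `[j..n]` followed by a restart at 1. -/
theorem cyc_block (n : Int) :
    ∀ (k : Nat) (j : Int), 1 ≤ j → j + k = n → ∀ (r : Nat),
      cyc n j (k + 1 + r) = PySem.List.pyRange j (n + 1) 1 ++ cyc n 1 r := by
  intro k
  induction k with
  | zero =>
    intro j hj1 hjn r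
    have hje : j = n := by omega
    have hb : PySem.List.pyRange j (n + 1) 1 = [j] := by
      rw [PySem.List.pyRange_one_cons (by omega), PySem.List.pyRange_one_eq_nil (by omega)]
    rw [hb, hje, Nat.add_comm]
    show n :: cyc n (if n < n then n + 1 else 1) r = n :: cyc n 1 r
    rw [if_neg (lt_irrefl n)]
  | succ k ih =>
    intro j hj1 hjn r
    have hlt : j < n := by omega
    have : k + 1 + 1 + r = (k + 1 + r) + 1 := by omega
    rw [this]
    show j :: cyc n (if j < n then j + 1 else 1) (k + 1 + r) = _
    rw [if_pos hlt, PySem.List.pyRange_one_cons (show j < n + 1 by omega),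
      List.cons_append, ih (j + 1) (by omega) (by omega) r]

/-- `m` full passes starting at 1, then the remainder. -/
theorem cyc_replicate (n : Int) (hn : 1 ≤ n) :
    ∀ (m : Nat) (r : Nat),
      cyc n 1 (m * n.toNat + r)
        = (List.replicate m (PySem.List.pyRange 1 (n + 1) 1)).flatten ++ cyc n 1 r := by
  intro m
  induction m with
  | zero => intro r; simp
  | succ m ih =>
    intro r
    have hlen : (m + 1) * n.toNat + r = (n.toNat - 1) + 1 + (m * n.toNat + r) := by
      have h1 : 1 ≤ n.toNat := by omega
      have h2 : (m + 1) * n.toNat = m * n.toNat + n.toNat := by ring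
      omega
    rw [hlen, cyc_block n (n.toNat - 1) 1 le_rfl (by omega) (m * n.toNat + r),
      ih r, List.replicate_succ, List.flatten_cons, List.append_assoc]

theorem mass_cr_eq (n : Int) : mass_cr n = mass_cr_alt n := by
  by_cases hn : n ≤ 0
  · unfold mass_cr massLoopA mass_cr_alt
    have hpos : (0 : Int) ≤ (n - 1) * n := by nlinarith
    rw [if_pos hn, if_pos (by simpa using hpos), if_neg (by omega), if_neg (by omega)]
  · have hn1 : 1 ≤ n := by omega
    have hk : ((n - 1) * n + 1 - ((([] : List Int)).length : Int)).toNat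
        = (n - 1).toNat * n.toNat + 1 := by
      have h1 : ((n - 1).toNat : Int) = n - 1 := by omega
      have h2 : (n.toNat : Int) = n := by omega
      have : ((n - 1).toNat * n.toNat : Int) = (n - 1) * n := by push_cast [h1, h2]; ring
      simp only [List.length_nil, Int.ofNat_zero, sub_zero]
      omega
    unfold mass_cr mass_cr_alt
    rw [if_neg hn,
      massLoopA_eq_cyc n ((n - 1) * n) hn1 ((n - 1).toNat * n.toNat + 1) 1 [] le_rfl hn1 hk,
      cyc_replicate n hn1 (n - 1).toNat 1]
    have h1 : cyc n 1 1 = [1] := by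
      show (1 : Int) :: cyc n _ 0 = [1]
      simp [cyc]
    rw [h1]
    simp

-- ===== VERDICT (by name: the statement is the Claim_ definition above) =====
theorem mass_cr_spec : Claim_equal_mass_cr := by
  intro n _
  unfold Spec_mass_cr
  exact mass_cr_eq n
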